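-- pv_equiv track=rewrite | github.com/NerbFox/Bot_1010 | src/algo.py | score_field
-- ===== SOURCE A (Python) =====
-- def score_field(field):
--     lines = 0
--     cols = len(field)
--     rows = len(field[0])
--     min_zeroes = cols
--     sum_of_group_zeroes = 0
--     for i in range(rows):
--         # count the number of zeroes, and the number of groups of zeroes in a row
--         zeroes = 0
--         if field[i][0] == 0:
--             sum_of_group_zeroes += 1
--             zeroes += 1
--         for j in range(1, cols):
--             if field[i][j] == 0:
--                 zeroes += 1
--                 if field[i][j - 1] != 0:
--                     sum_of_group_zeroes += 1
--         min_zeroes = min(min_zeroes, zeroes)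
--         # if the line is full or there are no zeroes in the line, increment the lines
--         if zeroes == 0:
--             lines += 1
--
--         # z = field[i].count(0)
--         # min_zeroes = min(min_zeroes, z)
--         # if z == 0:
--         #     lines += 1
--
--     # coba gausah score_all_pos + yg score rows gausah dikali atau ga diikutin aja
--     score_lines = lines ** 2
--     score_rows = rows - min_zeroes
--     score_group_zeroes = rows*cols - sum_of_group_zeroes
--     # score = score_lines * 3 * rows + score_rows
--     # score = rows*cols * score_lines * 3 + score_rows * rows + score_group_zeroes
--     score = rows*cols * score_lines * 3 + score_group_zeroes
--     return score
-- ===== SOURCE B (Python) =====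
-- def score_field(field):
--     cols = len(field)
--     rows = len(field[0])
--     lines = 0
--     groups = 0
--     for i in range(rows):
--         # encode the row's zero cells as a bitmask, then count zero-runs by bit-twiddling:
--         # ends = bits that are the last cell of a maximal zero run
--         mask = 0
--         for j in range(cols):
--             if field[i][j] == 0:
--                 mask += 1 << j
--         ends = mask ^ (mask & (mask >> 1))
--         groups += bin(ends).count("1")
--         if mask == 0:
--             lines += 1
--     return rows * cols * lines ** 2 * 3 + (rows * cols - groups)
-- ===== Notes on version B (the rewrite author's own statement) =====
-- stated objective: alternative
-- what changed: B replaces A's cell-by-cell scan with neighbour tests and running counters by a bitset representation: each row is packed into an integer bitmask of its zero cells, zero-runs are counted as the popcount of the run-end bits mask ^ (mask & (mask >> 1)), full lines as mask == 0, and A's dead min_zeroes/score_rows computation is dropped.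
import Mathlib
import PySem

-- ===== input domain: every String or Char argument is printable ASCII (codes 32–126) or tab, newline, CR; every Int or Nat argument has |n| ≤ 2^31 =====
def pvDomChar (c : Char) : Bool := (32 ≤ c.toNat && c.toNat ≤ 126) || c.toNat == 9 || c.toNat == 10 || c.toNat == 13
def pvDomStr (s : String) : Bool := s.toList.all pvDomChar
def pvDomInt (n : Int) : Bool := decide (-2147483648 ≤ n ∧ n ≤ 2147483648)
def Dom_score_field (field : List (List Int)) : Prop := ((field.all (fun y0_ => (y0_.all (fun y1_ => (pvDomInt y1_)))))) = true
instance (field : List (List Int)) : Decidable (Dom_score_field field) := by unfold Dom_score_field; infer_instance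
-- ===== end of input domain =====

-- B encodes each row's zero cells as a bitmask integer and counts zero-runs by bit-twiddling
-- (run-ends = mask ^ (mask & (mask >> 1)), popcount), dropping A's dead min_zeroes computation (objective: alternative).


-- ===== PORT A =====
-- inner loop body: for j in range(1, cols): if field[i][j] == 0: zeroes += 1; if field[i][j-1] != 0: sum_of_group_zeroes += 1
-- (pyGetD defaults are only reached on inputs where the Python raises IndexError; those are excluded by Pre_score_field)
def aInnerStep (row : List Int) (p : Int × Int) (j : Int) : Int × Int :=
  if PySem.List.pyGetD row j (1 : Int) = 0 then
    (p.1 + 1, if PySem.List.pyGetD row (j - 1) (1 : Int) ≠ 0 then p.2 + 1 else p.2)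
  else p

-- outer loop body over i; state = (lines, min_zeroes, sum_of_group_zeroes)
def aOuterStep (field : List (List Int)) (cols : Nat) (st : Int × Int × Int) (i : Int) : Int × Int × Int :=
  let row := PySem.List.pyGetD field i []
  let init : Int × Int :=
    if PySem.List.pyGetD row 0 (1 : Int) = 0 then (1, st.2.2 + 1) else (0, st.2.2)
  let zs := (PySem.List.pyRange 1 (cols : Int) 1).foldl (aInnerStep row) init
  (st.1 + (if zs.1 = 0 then 1 else 0), min st.2.1 zs.1, zs.2)

def score_field (field : List (List Int)) : Int :=
  let cols := field.length
  let rows := (PySem.List.pyGetD field 0 ([] : List Int)).length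
  let st := (PySem.List.pyRange 0 (rows : Int) 1).foldl (aOuterStep field cols) (0, (cols : Int), 0)
  -- score_rows = rows - min_zeroes is computed by A but never used in the returned score
  (rows : Int) * (cols : Int) * (st.1 ^ 2) * 3 + ((rows : Int) * (cols : Int) - st.2.2)

-- ===== PORT B =====
-- bin(n).count("1") = number of 1 digits in n's binary expansion
def popCnt (n : Nat) : Nat := (Nat.digits 2 n).count 1

-- inner loop: for j in range(cols): if field[i][j] == 0: mask += 1 << j
-- (j from range(cols) is always ≥ 0, so j.toNat is exact for Python's 1 << j)
def bRowMask (row : List Int) (cols : Nat) : Nat :=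
  (PySem.List.pyRange 0 (cols : Int) 1).foldl
    (fun m j => if PySem.List.pyGetD row j (1 : Int) = 0 then m + (1 <<< j.toNat) else m) 0

-- outer loop body; state = (lines, groups)
def bOuterStep (field : List (List Int)) (cols : Nat) (st : Int × Int) (i : Int) : Int × Int :=
  let mask := bRowMask (PySem.List.pyGetD field i []) cols
  let ends := mask ^^^ (mask &&& (mask >>> 1))
  (st.1 + (if mask = 0 then 1 else 0), st.2 + (popCnt ends : Int))

def score_field_alt (field : List (List Int)) : Int :=
  let cols := field.length
  let rows := (PySem.List.pyGetD field 0 ([] : List Int)).length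
  let st := (PySem.List.pyRange 0 (rows : Int) 1).foldl (bOuterStep field cols) (0, 0)
  (rows : Int) * (cols : Int) * (st.1 ^ 2) * 3 + ((rows : Int) * (cols : Int) - st.2)

-- ===== PRECONDITION & SPEC =====
-- Pre_ excludes exactly the inputs where the Python A raises: empty field (field[0] → IndexError),
-- rows > cols (field[i] out of range for some i < rows), or a row among the first `rows` shorter than cols.
def Pre_score_field (field : List (List Int)) : Prop :=
  field ≠ [] ∧ (PySem.List.pyGetD field 0 ([] : List Int)).length ≤ field.length ∧
    ∀ row ∈ field.take (PySem.List.pyGetD field 0 ([] : List Int)).length, field.length ≤ row.length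
instance (field : List (List Int)) : Decidable (Pre_score_field field) := by unfold Pre_score_field; infer_instance
def pvWitness_score_field : List (List Int) := [[1, 0], [0, 0]]

def Spec_score_field (field : List (List Int)) (out : Int) : Prop := out = score_field_alt field
instance (field : List (List Int)) (out : Int) : Decidable (Spec_score_field field out) := by unfold Spec_score_field; infer_instance

-- ===== CLAIM (what is proved, stated in full; the proofs are below) =====
def Claim_equal_score_field : Prop := ∀ (field : List (List Int)), Dom_score_field field → Pre_score_field field → Spec_score_field field (score_field field)

-- ===== LEMMAS AND PROOFS =====

-- per-row abstractions: zcount = #zeros, pcount = #adjacent zero-zero pairs, cellsOf = the first n cells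
def zcount (l : List Int) : Int := (List.count 0 l : Int)
def pcount (l : List Int) : Int := ((l.zip l.tail).filter (fun ab => ab.1 == 0 && ab.2 == 0)).length
def cellsOf (row : List Int) (n : Nat) : List Int :=
  (PySem.List.pyRange 0 (n : Int) 1).map (fun j => PySem.List.pyGetD row j (1 : Int))

theorem cellsOf_succ (row : List Int) (n : Nat) :
    cellsOf row (n + 1) = cellsOf row n ++ [PySem.List.pyGetD row (n : Int) (1 : Int)] := by
  unfold cellsOf
  rw [show (((n + 1 : Nat) : Int)) = (n : Int) + 1 by push_cast; ring,
    PySem.List.pyRange_one_succ_right (by positivity), List.map_append]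
  simp

theorem zcount_append (l : List Int) (x : Int) :
    zcount (l ++ [x]) = zcount l + (if x = 0 then 1 else 0) := by
  simp [zcount, List.count_append, List.count_singleton]

theorem pcount_append (l : List Int) (x : Int) (h : l ≠ []) :
    pcount (l ++ [x]) = pcount l + (if l.getLastD 1 = 0 ∧ x = 0 then 1 else 0) := by
  induction l with
  | nil => simp at h
  | cons a t ih =>
    cases t with
    | nil =>
      simp [pcount]
      split_ifs with h1 <;> simp_all
    | cons b t2 =>
      have hzip : pcount (a :: b :: t2 ++ [x]) =
          (if a = 0 ∧ b = 0 then 1 else 0) + pcount (b :: t2 ++ [x]) := by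
        simp [pcount]
        split_ifs <;> simp_all <;> omega
      have hzip2 : pcount (a :: b :: t2) =
          (if a = 0 ∧ b = 0 then 1 else 0) + pcount (b :: t2) := by
        simp [pcount]
        split_ifs <;> simp_all <;> omega
      rw [show (a :: b :: t2 ++ [x]) = a :: ((b :: t2) ++ [x]) by simp] at hzip ⊢
      rw [hzip, ih (by simp), hzip2]
      simp [List.getLastD]
      omega

theorem cellsOf_getLastD (row : List Int) (n : Nat) (hn : 1 ≤ n) :
    (cellsOf row n).getLastD 1 = PySem.List.pyGetD row ((n : Int) - 1) (1 : Int) := by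
  obtain ⟨m, rfl⟩ : ∃ m, n = m + 1 := ⟨n - 1, by omega⟩
  rw [cellsOf_succ]
  simp

-- A's inner loop (including the j = 0 special case folded into the initial state) computes, for the
-- first n cells, (number of zeros, s + number of zeros − number of adjacent zero-zero pairs).
theorem inner_eq (row : List Int) :
    ∀ n : Nat, 1 ≤ n → ∀ s : Int,
      (PySem.List.pyRange 1 (n : Int) 1).foldl (aInnerStep row)
        (if PySem.List.pyGetD row 0 (1 : Int) = 0 then ((1 : Int), s + 1) else (0, s))
      = (zcount (cellsOf row n), s + (zcount (cellsOf row n) - pcount (cellsOf row n))) := by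
  intro n hn
  induction n, hn using Nat.le_induction with
  | base =>
    intro s
    rw [show ((1 : Nat) : Int) = 1 by norm_num, PySem.List.pyRange_one_eq_nil le_rfl]
    have h1 : cellsOf row 1 = [PySem.List.pyGetD row 0 (1 : Int)] := by
      unfold cellsOf
      rw [show ((1 : Nat) : Int) = 0 + 1 by norm_num, PySem.List.pyRange_one_singleton]
      simp
    rw [List.foldl_nil, h1]
    split_ifs with h0 <;> simp [zcount, pcount, h0]
  | succ n hn ih =>
    intro s
    rw [show (((n + 1 : Nat)) : Int) = (n : Int) + 1 by push_cast; ring,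
      PySem.List.pyRange_one_succ_right (by exact_mod_cast hn), List.foldl_append,
      ih s, List.foldl_cons, List.foldl_nil, cellsOf_succ, zcount_append,
      pcount_append _ _ (by
        have : (cellsOf row n).length = n := by
          simp [cellsOf, PySem.List.length_pyRange_one]
        intro hne
        rw [hne] at this
        simp at this
        omega),
      cellsOf_getLastD row n hn]
    unfold aInnerStep
    split_ifs with h1 h2 h3 <;> simp_all <;> omega

-- ---- B-side bit lemmas: the mask is the little-endian encoding of the row's zero-indicator list ----

-- little-endian binary encoding of a Bool list
def boolEnc : List Bool → Nat
  | [] => 0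
  | b :: t => (cond b 1 0) + 2 * boolEnc t

-- run-end indicator list: bit j set iff bs[j] and not bs[j+1]
def rends : List Bool → List Bool
  | [] => []
  | [b] => [b]
  | a :: b :: t => (a && !b) :: rends (b :: t)

theorem boolEnc_append (l : List Bool) (b : Bool) :
    boolEnc (l ++ [b]) = boolEnc l + (cond b 1 0) * 2 ^ l.length := by
  induction l with
  | nil => simp [boolEnc]
  | cons a t ih => simp [boolEnc, ih, pow_succ]; ring

theorem mask_eq (row : List Int) (cols : Nat) :
    bRowMask row cols = boolEnc ((cellsOf row cols).map (fun c => decide (c = 0))) := by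
  induction cols with
  | zero =>
    unfold bRowMask cellsOf
    rw [show ((0 : Nat) : Int) = 0 by norm_num, PySem.List.pyRange_one_eq_nil le_rfl]
    simp [boolEnc]
  | succ n ih =>
    unfold bRowMask at ih ⊢
    rw [show (((n + 1 : Nat)) : Int) = (n : Int) + 1 by push_cast; ring,
      PySem.List.pyRange_one_succ_right (by positivity), List.foldl_append, ih,
      cellsOf_succ, List.map_append, List.foldl_cons, List.foldl_nil]
    simp only [List.map_cons, List.map_nil]
    rw [boolEnc_append]
    have hlen : ((cellsOf row n).map (fun c => decide (c = 0))).length = n := by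
      simp [cellsOf, PySem.List.length_pyRange_one]
    split_ifs with h <;>
      simp only [PySem.List.pyGetD_natCast, List.getD_eq_getElem?_getD] at h <;>
      simp [h, hlen, Nat.shiftLeft_eq]

theorem testBit_boolEnc (bs : List Bool) : ∀ j, (boolEnc bs).testBit j = bs.getD j false := by
  induction bs with
  | nil => intro j; simp [boolEnc]
  | cons b t ih =>
    intro j
    cases j with
    | zero =>
      cases b <;> simp [boolEnc, Nat.testBit_zero] <;> omega
    | succ k =>
      have hdiv : ((cond b 1 0) + 2 * boolEnc t) / 2 = boolEnc t := by cases b <;> simp <;> omega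
      simp [boolEnc, Nat.testBit_succ, hdiv, ih k]

theorem getD_rends (bs : List Bool) :
    ∀ j, (rends bs).getD j false = (bs.getD j false && !bs.getD (j + 1) false) := by
  induction bs with
  | nil => intro j; simp [rends]
  | cons a t ih =>
    cases t with
    | nil =>
      intro j
      cases j <;> simp [rends]
    | cons b t2 =>
      intro j
      cases j with
      | zero => simp [rends]
      | succ k => simpa [rends] using ih k

theorem ends_eq (bs : List Bool) :
    boolEnc bs ^^^ (boolEnc bs &&& (boolEnc bs >>> 1)) = boolEnc (rends bs) := by
  apply Nat.eq_of_testBit_eq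
  intro j
  simp only [Nat.testBit_xor, Nat.testBit_and, Nat.testBit_shiftRight, testBit_boolEnc,
    getD_rends, Nat.add_comm 1 j]
  cases h1 : bs.getD j false <;> cases h2 : bs.getD (j + 1) false <;> rfl

theorem popCnt_boolEnc (bs : List Bool) : popCnt (boolEnc bs) = bs.count true := by
  induction bs with
  | nil => simp [popCnt, boolEnc]
  | cons b t ih =>
    by_cases h0 : boolEnc (b :: t) = 0
    · have hb : b = false := by
        cases b
        · rfl
        · exfalso; simp [boolEnc] at h0
      have ht : boolEnc t = 0 := by
        cases b <;> simp [boolEnc] at h0 <;> omega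
      rw [h0]
      have : t.count true = 0 := by rw [← ih, ht]; simp [popCnt]
      simp [popCnt, hb, List.count_cons, this]
    · have hd : Nat.digits 2 (boolEnc (b :: t)) =
          (boolEnc (b :: t)) % 2 :: Nat.digits 2 ((boolEnc (b :: t)) / 2) := by
        exact Nat.digits_def' (by norm_num) (Nat.pos_of_ne_zero h0)
      have hmod : (boolEnc (b :: t)) % 2 = cond b 1 0 := by
        cases b <;> simp [boolEnc] <;> omega
      have hdiv : (boolEnc (b :: t)) / 2 = boolEnc t := by
        cases b <;> simp [boolEnc] <;> omega
      rw [popCnt, hd, hmod, hdiv, List.count_cons]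
      rw [popCnt] at ih
      cases b <;> simp [ih, List.count_cons] <;> omega

theorem boolEnc_eq_zero_iff (bs : List Bool) : boolEnc bs = 0 ↔ bs.count true = 0 := by
  induction bs with
  | nil => simp [boolEnc]
  | cons b t ih =>
    cases b <;> simp [boolEnc, List.count_cons, ih] <;> omega

theorem count_true_map_zero (l : List Int) :
    ((l.map (fun c => decide (c = 0))).count true : Int) = zcount l := by
  have h : (l.map (fun c => decide (c = 0))).count true = l.count 0 := by
    induction l with
    | nil => rfl
    | cons a t ih => by_cases h : a = 0 <;> simp [List.count_cons, h, ih]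
  simp [zcount, h]

theorem rends_count (l : List Int) :
    (((rends (l.map (fun c => decide (c = 0)))).count true : Nat) : Int) = zcount l - pcount l := by
  induction l with
  | nil => simp [rends, zcount, pcount]
  | cons a t ih =>
    cases t with
    | nil =>
      by_cases h : a = 0 <;> simp [rends, h, List.count_cons, zcount, pcount]
    | cons b t2 =>
      have hz : zcount (a :: b :: t2) = (if a = 0 then 1 else 0) + zcount (b :: t2) := by
        unfold zcount
        rw [List.count_cons]
        push_cast
        by_cases h : a = 0 <;> simp [h] <;> ring
      have hp : pcount (a :: b :: t2) = (if a = 0 ∧ b = 0 then 1 else 0) + pcount (b :: t2) := by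
        simp [pcount]
        split_ifs <;> simp_all <;> omega
      have hr : rends ((a :: b :: t2).map (fun c => decide (c = 0))) =
          (decide (a = 0) && !decide (b = 0)) :: rends ((b :: t2).map (fun c => decide (c = 0))) := by
        simp [rends]
      rw [hr, List.count_cons, hz, hp]
      simp only [beq_iff_eq, Bool.and_eq_true, Bool.not_eq_true', decide_eq_true_eq,
        decide_eq_false_iff_not]
      push_cast
      split_ifs <;> omega

-- per-row bridge: B's popcount of run-ends is A's zeros − pairs, and mask = 0 iff zeros = 0
theorem row_runs_eq (row : List Int) (cols : Nat) :
    (popCnt (bRowMask row cols ^^^ (bRowMask row cols &&& (bRowMask row cols >>> 1))) : Int)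
      = zcount (cellsOf row cols) - pcount (cellsOf row cols) := by
  rw [mask_eq, ends_eq, popCnt_boolEnc, rends_count]

theorem row_mask_zero_iff (row : List Int) (cols : Nat) :
    bRowMask row cols = 0 ↔ zcount (cellsOf row cols) = 0 := by
  rw [mask_eq, boolEnc_eq_zero_iff]
  constructor
  · intro h
    have := count_true_map_zero (cellsOf row cols)
    rw [h] at this
    omega
  · intro h
    have := count_true_map_zero (cellsOf row cols)
    omega

-- the two outer folds keep lines and group-zero counts in lockstep (A additionally drags min_zeroes)
theorem outer_eq (field : List (List Int)) (cols : Nat) (hc : 1 ≤ cols) :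
    ∀ (L : List Int) (la mz sa : Int),
      (L.foldl (aOuterStep field cols) (la, mz, sa)).1
        = (L.foldl (bOuterStep field cols) (la, sa)).1 ∧
      (L.foldl (aOuterStep field cols) (la, mz, sa)).2.2
        = (L.foldl (bOuterStep field cols) (la, sa)).2 := by
  intro L
  induction L with
  | nil => intro la mz sa; exact ⟨rfl, rfl⟩
  | cons i t ih =>
    intro la mz sa
    rw [List.foldl_cons, List.foldl_cons]
    have hA : aOuterStep field cols (la, mz, sa) i =
        (la + (if zcount (cellsOf (PySem.List.pyGetD field i []) cols) = 0 then 1 else 0),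
         min mz (zcount (cellsOf (PySem.List.pyGetD field i []) cols)),
         sa + (zcount (cellsOf (PySem.List.pyGetD field i []) cols)
               - pcount (cellsOf (PySem.List.pyGetD field i []) cols))) := by
      simp only [aOuterStep]
      rw [inner_eq (PySem.List.pyGetD field i []) cols hc sa]
    have hB : bOuterStep field cols (la, sa) i =
        (la + (if zcount (cellsOf (PySem.List.pyGetD field i []) cols) = 0 then 1 else 0),
         sa + (zcount (cellsOf (PySem.List.pyGetD field i []) cols)
               - pcount (cellsOf (PySem.List.pyGetD field i []) cols))) := by
      simp only [bOuterStep]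
      rw [row_runs_eq]
      congr 1
      by_cases h : bRowMask (PySem.List.pyGetD field i []) cols = 0
      · rw [if_pos h, if_pos ((row_mask_zero_iff _ _).mp h)]
      · rw [if_neg h, if_neg (fun hz => h ((row_mask_zero_iff _ _).mpr hz))]
    rw [hA, hB]
    exact ih _ _ _

-- ===== VERDICT (by name: the statement is the Claim_ definition above) =====
theorem score_field_spec : Claim_equal_score_field := by
  intro field _ hpre
  simp only [Spec_score_field, score_field, score_field_alt]
  obtain ⟨hne, -, -⟩ := hpre
  have hc : 1 ≤ field.length := List.length_pos_of_ne_nil hne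
  obtain ⟨h1, h2⟩ := outer_eq field field.length hc
      (PySem.List.pyRange 0 ((PySem.List.pyGetD field 0 ([] : List Int)).length : Int) 1)
      0 (field.length : Int) 0
  rw [h1, h2]
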